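-- pv_equiv track=rewrite | github.com/hortonhearsadan/AoC | 2016/day4.py | check
-- ===== SOURCE A (Python) =====
-- from collections import Counter
--
-- def check(check_sum, code):
--     code_set = set(code)
--     sum_set = set(check_sum)
--     if not code_set & sum_set == sum_set:
--         return False
--
--     sort = [item for items, c in Counter(sorted(code)).most_common()
--               for item in [items]]
--     checked_code = ''.join(sort[:5])
--     # sort=sorted(sorted(code),key=lambda x: -code.count(x))
--     # checked_code = ''
--     # for x in sort:
--     #     if not x in checked_code:
--     #         checked_code += x
--     #         if len(checked_code) == 5:
--     #             break
--     return checked_code == check_sum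
-- ===== SOURCE B (Python) =====
-- def check(check_sum, code):
--     # Count letters in one pass, then build the top-5 string by repeated
--     # selection of the most frequent remaining letter (ties: alphabetically
--     # first), instead of sorting the whole multiset and slicing.
--     counts = {}
--     for ch in code:
--         counts[ch] = counts.get(ch, 0) + 1
--     pairs = list(counts.items())
--     top = []
--     while pairs and len(top) < 5:
--         best = pairs[0]
--         for p in pairs[1:]:
--             if p[1] > best[1] or (p[1] == best[1] and p[0] < best[0]):
--                 best = p
--         top.append(best[0])
--         pairs.remove(best)
--     return ''.join(top) == check_sum
-- ===== Notes on version B (the rewrite author's own statement) =====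
-- stated objective: faster
-- what changed: B drops A's redundant set-intersection guard and replaces sorted(code) + Counter + most_common() sort-and-slice by a single counting pass over code followed by five rounds of selecting the most frequent remaining letter (ties alphabetically first).
import Mathlib
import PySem

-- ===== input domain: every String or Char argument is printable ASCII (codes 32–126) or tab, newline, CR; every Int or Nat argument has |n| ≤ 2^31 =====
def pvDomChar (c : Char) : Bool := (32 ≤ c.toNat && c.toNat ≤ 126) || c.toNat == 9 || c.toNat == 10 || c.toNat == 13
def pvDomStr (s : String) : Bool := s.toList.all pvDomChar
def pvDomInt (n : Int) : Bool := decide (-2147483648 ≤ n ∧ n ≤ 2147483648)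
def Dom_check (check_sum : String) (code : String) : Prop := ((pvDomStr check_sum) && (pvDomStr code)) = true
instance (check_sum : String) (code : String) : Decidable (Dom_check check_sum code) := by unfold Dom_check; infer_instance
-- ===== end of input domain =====

-- B drops A's redundant set-intersection guard and replaces sort-the-whole-multiset-and-slice
-- by repeated selection of the most frequent remaining letter (alternative decomposition).

-- ===== PORT A =====
-- Literal port of A: set guard, then Counter(sorted(code)).most_common()
-- (= sorted(items, key=itemgetter(1), reverse=True)), take the first 5 keys,
-- join (''.join of single-char strings = String.ofList) and compare.
def check (check_sum : String) (code : String) : Bool :=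
  let code_set : PySem.Set Char := PySem.Set.ofList code.toList
  let sum_set : PySem.Set Char := PySem.Set.ofList check_sum.toList
  if !(PySem.Set.equal (PySem.Set.inter code_set sum_set) sum_set) then
    false
  else
    let sort :=
      (PySem.List.sorted
        (PySem.Dict.counter (PySem.List.sorted code.toList (fun x => x))).items
        (fun p => p.2) true).map (fun p => p.1)
    let checked_code := String.ofList (PySem.List.slice sort none (some 5))
    decide (checked_code = check_sum)

-- ===== PORT B =====
-- 'while pairs and len(top) < 5' with the inner best-scan and pairs.remove(best);
-- fuel n = 5 - len(top). best ∈ pairs always, so remove? is some (getD [] unreachable).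
def checkSelect : Nat → List (Char × Int) → List Char → List Char
  | _, [], top => top
  | 0, _ :: _, top => top
  | n+1, p :: ps, top =>
    let best := ps.foldl (fun b q => if b.2 < q.2 || (q.2 == b.2 && q.1 < b.1) then q else b) p
    checkSelect n ((PySem.List.remove? (p :: ps) best).getD []) (top ++ [best.1])

def check_alt (check_sum : String) (code : String) : Bool :=
  let counts := code.toList.foldl (fun d ch => d.insert ch (d.getD ch 0 + 1)) PySem.Dict.empty
  let top := checkSelect 5 counts.items []
  decide (String.ofList top = check_sum)

-- ===== PRECONDITION & SPEC =====
def Spec_check (check_sum : String) (code : String) (out : Bool) : Prop := out = check_alt check_sum code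
instance (check_sum : String) (code : String) (out : Bool) : Decidable (Spec_check check_sum code out) := by unfold Spec_check; infer_instance

-- ===== CLAIM (what is proved, stated in full; the proofs are below) =====
def Claim_equal_check : Prop := ∀ (check_sum : String) (code : String), Dom_check check_sum code → Spec_check check_sum code (check check_sum code)

-- ===== LEMMAS AND PROOFS =====

-- The ranking order of most_common over a char-increasing item list: p ranks strictly before q.
def pvR (p q : Char × Int) : Prop := q.2 < p.2 ∨ (p.2 = q.2 ∧ p.1 < q.1)

lemma pvR_trans {p q r : Char × Int} (h1 : pvR p q) (h2 : pvR q r) : pvR p r := by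
  rcases h1 with h1 | ⟨h1, h1'⟩ <;> rcases h2 with h2 | ⟨h2, h2'⟩
  · exact Or.inl (lt_trans h2 h1)
  · exact Or.inl (h2 ▸ h1)
  · exact Or.inl (h1 ▸ h2)
  · exact Or.inr ⟨h1.trans h2, lt_trans h1' h2'⟩

lemma pvR_asymm {p q : Char × Int} (h1 : pvR p q) (h2 : pvR q p) : False := by
  rcases h1 with h1 | ⟨h1, h1'⟩ <;> rcases h2 with h2 | ⟨h2, h2'⟩
  · omega
  · omega
  · omega
  · exact absurd (h1'.trans h2') (lt_irrefl _)

lemma pvR_total (p q : Char × Int) : p = q ∨ pvR p q ∨ pvR q p := by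
  rcases lt_trichotomy p.2 q.2 with h | h | h
  · exact Or.inr (Or.inr (Or.inl h))
  · rcases lt_trichotomy p.1 q.1 with h' | h' | h'
    · exact Or.inr (Or.inl (Or.inr ⟨h, h'⟩))
    · exact Or.inl (Prod.ext h' h)
    · exact Or.inr (Or.inr (Or.inr ⟨h.symm, h'⟩))
  · exact Or.inr (Or.inl (Or.inl h))

lemma pvInsertBy_perm {α : Type} (before : α → α → Bool) (x : α) (ys : List α) :
    (PySem.List.insertBy before x ys).Perm (x :: ys) := by
  induction ys with
  | nil => simp [PySem.List.insertBy]
  | cons y ys ih =>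
    simp only [PySem.List.insertBy]
    split
    · exact List.Perm.refl _
    · exact ((ih.cons y).trans (List.Perm.swap x y ys))

-- insertBy with the reverse-count comparison keeps pvR-pairwiseness when the inserted
-- element's char is larger than every char already present (CPython sort stability).
lemma pvInsertBy_pairwise (x : Char × Int) (ys : List (Char × Int))
    (hys : ys.Pairwise pvR) (hch : ∀ y ∈ ys, y.1 < x.1) :
    (PySem.List.insertBy (fun a b => decide ((b : Char × Int).2 < a.2)) x ys).Pairwise pvR := by
  induction ys with
  | nil => simp [PySem.List.insertBy]
  | cons y ys ih =>
    simp only [PySem.List.insertBy]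
    split
    · rename_i h
      simp only [decide_eq_true_eq] at h
      refine List.Pairwise.cons ?_ hys
      intro z hz
      rcases List.mem_cons.mp hz with rfl | hz
      · exact Or.inl h
      · rcases (List.pairwise_cons.mp hys).1 z hz with h' | ⟨h', h''⟩
        · exact Or.inl (h'.trans h)
        · exact Or.inl (h' ▸ h)
    · rename_i h
      simp only [decide_eq_true_eq, not_lt] at h
      refine List.Pairwise.cons ?_ (ih (List.pairwise_cons.mp hys).2
        (fun z hz => hch z (List.mem_cons_of_mem y hz)))
      intro z hz
      rcases List.mem_cons.mp ((pvInsertBy_perm _ x ys).mem_iff.mp hz) with rfl | hz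
      · rcases lt_or_eq_of_le h with h' | h'
        · exact Or.inl h'
        · exact Or.inr ⟨h'.symm, hch y (List.mem_cons_self ..)⟩
      · exact (List.pairwise_cons.mp hys).1 z hz

lemma pvFoldl_insertBy_pairwise (xs : List (Char × Int)) (acc : List (Char × Int))
    (hxs : xs.Pairwise (fun a b => a.1 < b.1))
    (hacc : acc.Pairwise pvR)
    (hcross : ∀ y ∈ acc, ∀ x ∈ xs, y.1 < x.1) :
    (xs.foldl (fun acc x =>
        PySem.List.insertBy (fun a b => decide ((b : Char × Int).2 < a.2)) x acc) acc).Pairwise pvR := by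
  induction xs generalizing acc with
  | nil => exact hacc
  | cons x xs ih =>
    simp only [List.foldl_cons]
    refine ih _ (List.pairwise_cons.mp hxs).2
      (pvInsertBy_pairwise x acc hacc (fun y hy => hcross y hy x (List.mem_cons_self ..))) ?_
    intro y hy x' hx'
    rcases List.mem_cons.mp ((pvInsertBy_perm _ x acc).mem_iff.mp hy) with rfl | hy
    · exact (List.pairwise_cons.mp hxs).1 x' hx'
    · exact hcross y hy x' (List.mem_cons_of_mem x hx')

-- most_common of a char-increasing item list is pvR-pairwise
lemma pvSortedRev_pairwise (xs : List (Char × Int))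
    (hxs : xs.Pairwise (fun a b => a.1 < b.1)) :
    (PySem.List.sorted xs (fun p => p.2) true).Pairwise pvR := by
  rw [PySem.List.sorted_rev_eq_foldl_insertBy]
  exact pvFoldl_insertBy_pairwise xs [] hxs List.Pairwise.nil (by simp)

-- set(xs) is a sublist of xs
lemma pvOfList_sublist {α : Type} [BEq α] [LawfulBEq α] (xs : List α) :
    (PySem.Set.ofList xs).Sublist xs := by
  induction xs with
  | nil => simp [PySem.Set.ofList, PySem.Set.empty]
  | cons x xs ih =>
    rw [PySem.Set.ofList_cons]
    refine List.Sublist.cons₂ x (List.Sublist.trans ?_ ih)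
    simp only [PySem.Set.discard]
    exact List.filter_sublist

-- the inner best-scan returns an element that pvR-dominates (or equals) every element
lemma pvBest_spec (ps : List (Char × Int)) (p : Char × Int) :
    (ps.foldl (fun b q => if b.2 < q.2 || (q.2 == b.2 && q.1 < b.1) then q else b) p) ∈ p :: ps ∧
    ∀ q ∈ p :: ps, q = (ps.foldl (fun b q => if b.2 < q.2 || (q.2 == b.2 && q.1 < b.1) then q else b) p) ∨
      pvR (ps.foldl (fun b q => if b.2 < q.2 || (q.2 == b.2 && q.1 < b.1) then q else b) p) q := by
  induction ps generalizing p with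
  | nil =>
    refine ⟨List.mem_cons_self .., ?_⟩
    intro q hq
    rcases List.mem_cons.mp hq with rfl | hq
    · exact Or.inl rfl
    · exact absurd hq (List.not_mem_nil)
  | cons q ps ih =>
    have hbq : ((decide (p.2 < q.2) || (q.2 == p.2 && decide (q.1 < p.1))) = true) ↔ pvR q p := by
      simp [pvR]
    simp only [List.foldl_cons]
    by_cases hq : pvR q p
    · rw [if_pos (hbq.mpr hq)]
      obtain ⟨hm, hall⟩ := ih q
      refine ⟨List.mem_cons_of_mem p hm, ?_⟩
      intro r hr
      rcases List.mem_cons.mp hr with rfl | hr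
      · -- r = p : best beats (or is) q, and q beats p
        rcases hall q (List.mem_cons_self ..) with h | h
        · exact Or.inr (by rw [← h]; exact hq)
        · exact Or.inr (pvR_trans h hq)
      · exact hall r hr
    · rw [if_neg (fun h => hq (hbq.mp h))]
      obtain ⟨hm, hall⟩ := ih p
      refine ⟨?_, ?_⟩
      · rcases List.mem_cons.mp hm with h | h
        · rw [h]; exact List.mem_cons_self ..
        · exact List.mem_cons_of_mem p (List.mem_cons_of_mem q h)
      · intro r hr
        rcases List.mem_cons.mp hr with rfl | hr
        · exact hall r (List.mem_cons_self ..)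
        · rcases List.mem_cons.mp hr with rfl | hr
          · -- r = q and ¬ pvR q p : by totality q = p or pvR p q
            rcases pvR_total p r with h | h | h
            · rcases hall p (List.mem_cons_self ..) with h' | h'
              · exact Or.inl (by rw [← h]; exact h')
              · exact Or.inr (by rw [← h]; exact h')
            · rcases hall p (List.mem_cons_self ..) with h' | h'
              · exact Or.inr (by rw [← h']; exact h)
              · exact Or.inr (pvR_trans h' h)
            · exact absurd h hq
          · exact hall r (List.mem_cons_of_mem p hr)

-- selection from any permutation of a pvR-pairwise list yields its take-prefix
lemma pvCheckSelect_eq (n : Nat) (L pairs : List (Char × Int)) (top : List Char)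
    (hperm : pairs.Perm L) (hpw : L.Pairwise pvR) :
    checkSelect n pairs top = top ++ (L.take n).map (fun p => p.1) := by
  induction n generalizing L pairs top with
  | zero => cases pairs <;> simp [checkSelect]
  | succ n ih =>
    cases pairs with
    | nil =>
      have : L = [] := hperm.symm.eq_nil
      simp [checkSelect, this]
    | cons p ps =>
      cases L with
      | nil => exact absurd hperm.eq_nil (by simp)
      | cons h t =>
        simp only [checkSelect]
        obtain ⟨hmem, hall⟩ := pvBest_spec ps p
        set m := ps.foldl (fun b q => if b.2 < q.2 || (q.2 == b.2 && q.1 < b.1) then q else b) p with hm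
        have hmh : m = h := by
          have h1 : h = m ∨ pvR m h := hall h (hperm.symm.mem_iff.mp (List.mem_cons_self ..))
          have h2 : m = h ∨ pvR h m := by
            rcases List.mem_cons.mp (hperm.mem_iff.mp hmem) with h' | hmt
            · exact Or.inl h'
            · exact Or.inr ((List.pairwise_cons.mp hpw).1 m hmt)
          rcases h1 with h1 | h1
          · exact h1.symm
          · rcases h2 with h2 | h2
            · exact h2
            · exact absurd h1 (fun h' => pvR_asymm h' h2)
        rw [PySem.List.remove?_eq_some_erase _ m hmem, Option.getD_some]
        have hperm' : ((p :: ps).erase m).Perm t := by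
          have h1 := hperm.erase h
          rw [List.erase_cons_head] at h1
          rw [hmh]
          exact h1
        rw [ih t _ _ hperm' (List.pairwise_cons.mp hpw).2, hmh]
        simp

-- B's counter items are a permutation of A's (sorted-code) counter items
lemma pvItems_perm (cs : List Char) :
    (PySem.Dict.counter cs).items.Perm
      ((PySem.Dict.counter (PySem.List.sorted cs (fun x => x))).items) := by
  rw [PySem.Dict.items_counter, PySem.Dict.items_counter]
  have hsetperm : (PySem.Set.ofList cs).Perm (PySem.Set.ofList (PySem.List.sorted cs (fun x => x))) := by
    rw [List.perm_ext_iff_of_nodup (PySem.Set.nodup_ofList _) (PySem.Set.nodup_ofList _)]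
    intro a
    rw [PySem.Set.mem_ofList, PySem.Set.mem_ofList, PySem.List.mem_sorted]
  refine List.Perm.trans ?_ (hsetperm.map (fun k => (k, ((PySem.List.sorted cs (fun x => x)).count k : Int))))
  refine List.Perm.of_eq (List.map_congr_left ?_)
  intro k _
  rw [(PySem.List.sorted_perm cs (fun x => x) false).count_eq k]

-- A's item list is char-strictly-increasing
lemma pvItems_char_incr (cs : List Char) :
    ((PySem.Dict.counter (PySem.List.sorted cs (fun x => x))).items).Pairwise
      (fun a b => a.1 < b.1) := by
  rw [PySem.Dict.items_counter, List.pairwise_map]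
  have hle : (PySem.Set.ofList (PySem.List.sorted cs (fun x => x))).Pairwise (· ≤ ·) :=
    (PySem.List.sorted_pairwise cs (fun x => x)).sublist (pvOfList_sublist _)
  have hnd : (PySem.Set.ofList (PySem.List.sorted cs (fun x => x))).Nodup :=
    PySem.Set.nodup_ofList _
  exact (hle.and hnd).imp (fun h => lt_of_le_of_ne h.1 h.2)

-- the two top-5 letter lists coincide
lemma pvTop_eq (cs : List Char) :
    checkSelect 5
      ((cs.foldl (fun d ch => d.insert ch (d.getD ch 0 + 1)) PySem.Dict.empty).items) [] =
    PySem.List.slice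
      ((PySem.List.sorted
        (PySem.Dict.counter (PySem.List.sorted cs (fun x => x))).items
        (fun p => p.2) true).map (fun p => p.1)) none (some 5) := by
  rw [PySem.Dict.foldl_insert_getD_add_one_eq_counter]
  have hperm : (PySem.Dict.counter cs).items.Perm
      (PySem.List.sorted (PySem.Dict.counter (PySem.List.sorted cs (fun x => x))).items
        (fun p => p.2) true) :=
    (pvItems_perm cs).trans (PySem.List.sorted_perm _ _ _).symm
  have hpw := pvSortedRev_pairwise _ (pvItems_char_incr cs)
  rw [pvCheckSelect_eq 5 _ _ [] hperm hpw]
  rw [PySem.List.slice_to _ (by norm_num)]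
  simp [List.map_take]

-- every letter B's top list can contain occurs in code
lemma pvTop_mem (cs : List Char) (c : Char)
    (hc : c ∈ checkSelect 5
      ((cs.foldl (fun d ch => d.insert ch (d.getD ch 0 + 1)) PySem.Dict.empty).items) []) :
    c ∈ cs := by
  rw [pvTop_eq, PySem.List.slice_to _ (by norm_num)] at hc
  obtain ⟨p, hp, rfl⟩ := List.mem_map.mp (List.mem_of_mem_take hc)
  have hp' : p ∈ (PySem.Dict.counter (PySem.List.sorted cs (fun x => x))).items :=
    (PySem.List.mem_sorted _ _ _ _).mp hp
  rw [PySem.Dict.items_counter] at hp'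
  obtain ⟨k, hk, hkp⟩ := List.mem_map.mp hp'
  rw [← hkp]
  exact (PySem.List.mem_sorted _ _ _ _).mp ((PySem.Set.mem_ofList _ _).mp hk)

-- ===== VERDICT (by name: the statement is the Claim_ definition above) =====
theorem check_spec : Claim_equal_check := by
  intro check_sum code _
  unfold Spec_check
  simp only [check, check_alt]
  by_cases hg : (PySem.Set.equal
      (PySem.Set.inter (PySem.Set.ofList code.toList) (PySem.Set.ofList check_sum.toList))
      (PySem.Set.ofList check_sum.toList)) = true
  · rw [if_neg (by simp [hg]), ← pvTop_eq]
  · rw [if_pos (by simp [hg])]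
    symm
    rw [decide_eq_false_iff_not]
    intro heq
    apply hg
    rw [PySem.Set.equal_iff]
    intro x
    rw [PySem.Set.mem_inter]
    constructor
    · exact fun h => h.2
    · intro hx
      refine ⟨?_, hx⟩
      rw [PySem.Set.mem_ofList] at hx ⊢
      have htop : check_sum.toList = checkSelect 5
          ((code.toList.foldl (fun d ch => d.insert ch (d.getD ch 0 + 1)) PySem.Dict.empty).items) [] := by
        rw [← heq, String.toList_ofList]
      exact pvTop_mem code.toList x (htop ▸ hx)
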